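-- pv_equiv track=rewrite | github.com/89jobrien/pjlib | hooks/tests/test_permutations.py | generate_test_file
-- ===== SOURCE A (Python) =====
-- def generate_test_file(lines: int = 1000) -> str:
--     """Generate test file content with TODOs."""
--     content_lines = []
--     for i in range(lines):
--         if i % 50 == 0:
--             content_lines.append(f"# TODO: implement feature {i}")
--         elif i % 75 == 0:
--             content_lines.append(f"// FIXME: fix bug at line {i}")
--         elif i % 100 == 0:
--             content_lines.append(f"/* HACK: workaround for issue {i} */")
--         else:
--             content_lines.append(f"code_line_{i} = {i}")
--     return "\n".join(content_lines)
-- ===== SOURCE B (Python) =====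
-- def generate_test_file(lines: int = 1000) -> str:
--     """Generate test file content with TODOs."""
--     out = [f"code_line_{i} = {i}" for i in range(lines)]
--     for i in range(0, lines, 75):
--         if i % 50 != 0:
--             out[i] = f"// FIXME: fix bug at line {i}"
--     for i in range(0, lines, 50):
--         out[i] = f"# TODO: implement feature {i}"
--     return "\n".join(out)
-- ===== Notes on version B (the rewrite author's own statement) =====
-- stated objective: alternative
-- what changed: Replaces the per-line if/elif chain with a fill-then-overwrite scheme: build all default code lines, then overwrite only the strided FIXME indices (guarded by i % 50 != 0) and the strided TODO indices, dropping the unreachable HACK branch (every multiple of 100 is a multiple of 50).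
import Mathlib
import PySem

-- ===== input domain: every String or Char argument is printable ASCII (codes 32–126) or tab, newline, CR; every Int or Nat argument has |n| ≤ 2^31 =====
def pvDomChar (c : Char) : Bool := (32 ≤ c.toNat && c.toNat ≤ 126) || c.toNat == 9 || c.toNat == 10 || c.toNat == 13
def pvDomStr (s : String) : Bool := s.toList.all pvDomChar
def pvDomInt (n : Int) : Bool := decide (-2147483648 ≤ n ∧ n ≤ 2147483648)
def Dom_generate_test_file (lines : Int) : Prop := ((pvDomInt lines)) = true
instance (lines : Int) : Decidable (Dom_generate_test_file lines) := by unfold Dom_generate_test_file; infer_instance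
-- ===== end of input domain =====

-- B replaces A's per-line if/elif chain by fill-then-overwrite strided passes (dropping the unreachable HACK branch); objective: alternative decomposition, same cost.


-- ===== PORT A =====
def generate_test_file (lines : Int) : String :=
  let content_lines := (PySem.List.pyRange 0 lines 1).foldl (fun acc i =>
    if PySem.Int.mod i 50 = 0 then acc ++ ["# TODO: implement feature " ++ PySem.Int.toStr i]
    else if PySem.Int.mod i 75 = 0 then acc ++ ["// FIXME: fix bug at line " ++ PySem.Int.toStr i]
    else if PySem.Int.mod i 100 = 0 then acc ++ ["/* HACK: workaround for issue " ++ PySem.Int.toStr i ++ " */"]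
    else acc ++ ["code_line_" ++ PySem.Int.toStr i ++ " = " ++ PySem.Int.toStr i]) []
  PySem.Str.join "\n" content_lines

-- ===== PORT B =====
def generate_test_file_alt (lines : Int) : String :=
  let out0 := (PySem.List.pyRange 0 lines 1).map (fun i =>
    "code_line_" ++ PySem.Int.toStr i ++ " = " ++ PySem.Int.toStr i)
  let out1 := (PySem.List.pyRange 0 lines 75).foldl (fun acc i =>
    if PySem.Int.mod i 50 ≠ 0 then
      PySem.List.pySetD acc i ("// FIXME: fix bug at line " ++ PySem.Int.toStr i)
    else acc) out0
  let out2 := (PySem.List.pyRange 0 lines 50).foldl (fun acc i =>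
    PySem.List.pySetD acc i ("# TODO: implement feature " ++ PySem.Int.toStr i)) out1
  PySem.Str.join "\n" out2

-- ===== PRECONDITION & SPEC =====
def Spec_generate_test_file (lines : Int) (out : String) : Prop := out = generate_test_file_alt lines
instance (lines : Int) (out : String) : Decidable (Spec_generate_test_file lines out) := by unfold Spec_generate_test_file; infer_instance

-- ===== CLAIM (what is proved, stated in full; the proofs are below) =====
def Claim_equal_generate_test_file : Prop := ∀ (lines : Int), Dom_generate_test_file lines → Spec_generate_test_file lines (generate_test_file lines)

-- ===== LEMMAS AND PROOFS =====

def pvTodo (i : Int) : String := "# TODO: implement feature " ++ PySem.Int.toStr i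
def pvFix (i : Int) : String := "// FIXME: fix bug at line " ++ PySem.Int.toStr i
def pvCode (i : Int) : String := "code_line_" ++ PySem.Int.toStr i ++ " = " ++ PySem.Int.toStr i

-- A's line selector (with the dead HACK branch) and B's effective one
def pvSelA (i : Int) : String :=
  if PySem.Int.mod i 50 = 0 then pvTodo i
  else if PySem.Int.mod i 75 = 0 then pvFix i
  else if PySem.Int.mod i 100 = 0 then "/* HACK: workaround for issue " ++ PySem.Int.toStr i ++ " */"
  else pvCode i

def pvSel (i : Int) : String :=
  if PySem.Int.mod i 50 = 0 then pvTodo i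
  else if PySem.Int.mod i 75 = 0 then pvFix i
  else pvCode i

theorem pvSelA_eq_pvSel : pvSelA = pvSel := by
  funext i
  unfold pvSelA pvSel
  split_ifs with h1 h2 h3 <;> try rfl
  exact absurd ((PySem.Int.mod_eq_zero_iff_dvd i 50).mpr
    (dvd_trans ⟨2, by norm_num⟩ ((PySem.Int.mod_eq_zero_iff_dvd i 100).mp h3))) h1

-- a strided overwrite pass, read back element-wise
theorem pv_setfold_getElem? (p : Int → Prop) [DecidablePred p] (g : Int → String) :
    ∀ (is : List Int) (xs : List String), (∀ i ∈ is, 0 ≤ i ∧ i.toNat < xs.length) → ∀ (j : Nat),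
    (is.foldl (fun acc i => if p i then PySem.List.pySetD acc i (g i) else acc) xs)[j]? =
      if ((j : Int) ∈ is ∧ p (j : Int)) then some (g (j : Int)) else xs[j]? := by
  intro is
  induction is with
  | nil => intro xs _ j; simp
  | cons x t ih =>
    intro xs hmem j
    have hx := hmem x (by simp)
    have hlen : (if p x then PySem.List.pySetD xs x (g x) else xs).length = xs.length := by
      split_ifs <;> simp [PySem.List.length_pySetD]
    rw [List.foldl_cons, ih _ (by intro i hi; rw [hlen]; exact hmem i (by simp [hi]))]
    by_cases hin : (j : Int) ∈ t ∧ p (j : Int)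
    · simp [hin]
    · rw [if_neg hin]
      by_cases hpx : p x
      · rw [if_pos hpx, PySem.List.pySetD_of_nonneg _ _ hx.1, List.getElem?_set]
        by_cases hxj : x.toNat = j
        · have hxj' : x = (j : Int) := by omega
          simp [hxj, hxj ▸ hx.2, ← hxj', hpx]
        · have hxj' : x ≠ (j : Int) := by omega
          have : ¬ ((j : Int) = x ∨ (j : Int) ∈ t) ∨ ¬ p (j : Int) := by
            rcases Decidable.em (p (j : Int)) with hp | hp
            · left; rintro (h | h); exact hxj' h.symm; exact hin ⟨h, hp⟩
            · right; exact hp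
          simp only [List.mem_cons]
          rw [if_neg hxj, if_neg (by tauto)]
      · rw [if_neg hpx]
        have : ¬ (((j : Int) ∈ x :: t) ∧ p (j : Int)) := by
          rintro ⟨hm, hp⟩
          rcases List.mem_cons.mp hm with h | h
          · exact hpx (h ▸ hp)
          · exact hin ⟨h, hp⟩
        rw [if_neg this]

theorem pv_setfold_length (p : Int → Prop) [DecidablePred p] (g : Int → String) :
    ∀ (is : List Int) (xs : List String),
    (is.foldl (fun acc i => if p i then PySem.List.pySetD acc i (g i) else acc) xs).length = xs.length := by
  intro is
  induction is with
  | nil => intro xs; rfl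
  | cons x t ih =>
    intro xs
    rw [List.foldl_cons, ih]
    split_ifs <;> simp [PySem.List.length_pySetD]

theorem pv_alt_list (lines : Int) :
    ((PySem.List.pyRange 0 lines 50).foldl (fun acc i =>
        PySem.List.pySetD acc i ("# TODO: implement feature " ++ PySem.Int.toStr i))
      ((PySem.List.pyRange 0 lines 75).foldl (fun acc i =>
        if PySem.Int.mod i 50 ≠ 0 then
          PySem.List.pySetD acc i ("// FIXME: fix bug at line " ++ PySem.Int.toStr i)
        else acc)
        ((PySem.List.pyRange 0 lines 1).map (fun i =>
          "code_line_" ++ PySem.Int.toStr i ++ " = " ++ PySem.Int.toStr i))))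
    = (PySem.List.pyRange 0 lines 1).map pvSel := by
  set out0 := (PySem.List.pyRange 0 lines 1).map (fun i =>
    "code_line_" ++ PySem.Int.toStr i ++ " = " ++ PySem.Int.toStr i) with hout0
  have hlen0 : out0.length = lines.toNat := by
    simp [hout0, PySem.List.length_pyRange_one]
  have hmem75 : ∀ i ∈ PySem.List.pyRange 0 lines 75, 0 ≤ i ∧ i.toNat < out0.length := by
    intro i hi
    have := (PySem.List.mem_pyRange_iff_of_pos (by norm_num) i).mp hi
    constructor; exact this.1; rw [hlen0]; omega
  set out1 := (PySem.List.pyRange 0 lines 75).foldl (fun acc i =>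
    if PySem.Int.mod i 50 ≠ 0 then
      PySem.List.pySetD acc i ("// FIXME: fix bug at line " ++ PySem.Int.toStr i)
    else acc) out0 with hout1
  have hlen1 : out1.length = out0.length := by
    rw [hout1]
    exact pv_setfold_length (fun i => PySem.Int.mod i 50 ≠ 0) _ _ _
  have hmem50 : ∀ i ∈ PySem.List.pyRange 0 lines 50, 0 ≤ i ∧ i.toNat < out1.length := by
    intro i hi
    have := (PySem.List.mem_pyRange_iff_of_pos (by norm_num) i).mp hi
    constructor; exact this.1; rw [hlen1, hlen0]; omega
  apply List.ext_getElem?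
  intro j
  -- pass 2 (TODO): rewrite its predicate-free fold into the conditional shape
  have hfun2 : (fun (acc : List String) i =>
      PySem.List.pySetD acc i ("# TODO: implement feature " ++ PySem.Int.toStr i)) =
      (fun acc i => if (fun (_ : Int) => True) i then
        PySem.List.pySetD acc i ("# TODO: implement feature " ++ PySem.Int.toStr i) else acc) := by
    funext acc i; simp
  rw [hfun2, pv_setfold_getElem? _ _ _ _ hmem50 j,
      hout1, pv_setfold_getElem? _ _ _ _ hmem75 j]
  have h50 : (j : Int) ∈ PySem.List.pyRange 0 lines 50 ↔ (j : Int) < lines ∧ (50 : Int) ∣ (j : Int) := by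
    rw [PySem.List.mem_pyRange_iff_of_pos (by norm_num)]
    constructor
    · rintro ⟨_, h, hd⟩; exact ⟨h, by simpa using hd⟩
    · rintro ⟨h, hd⟩; exact ⟨by positivity, h, by simpa using hd⟩
  have h75 : (j : Int) ∈ PySem.List.pyRange 0 lines 75 ↔ (j : Int) < lines ∧ (75 : Int) ∣ (j : Int) := by
    rw [PySem.List.mem_pyRange_iff_of_pos (by norm_num)]
    constructor
    · rintro ⟨_, h, hd⟩; exact ⟨h, by simpa using hd⟩
    · rintro ⟨h, hd⟩; exact ⟨by positivity, h, by simpa using hd⟩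
  by_cases hj : j < lines.toNat
  · have hjl : (j : Int) < lines := by omega
    have hnn : (0 : Int) ≤ lines := by omega
    have hcast : lines = (lines.toNat : Int) := by omega
    have hr : (PySem.List.pyRange 0 lines 1) = PySem.List.pyRange 0 (lines.toNat : Int) 1 := by rw [← hcast]
    have hget : ∀ (f : Int → String),
        ((PySem.List.pyRange 0 lines 1).map f)[j]? = some (f (j : Int)) := by
      intro f
      rw [hr]
      exact PySem.List.getElem?_map_pyRange_zero f lines.toNat j hj
    rw [hout0, hget, hget]
    unfold pvSel
    by_cases hd50 : (50 : Int) ∣ (j : Int)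
    · have : PySem.Int.mod (j : Int) 50 = 0 := (PySem.Int.mod_eq_zero_iff_dvd _ _).mpr hd50
      simp [h50, hjl, hd50, this, pvSel, pvTodo]
    · have hm50 : PySem.Int.mod (j : Int) 50 ≠ 0 := fun h =>
        hd50 ((PySem.Int.mod_eq_zero_iff_dvd _ _).mp h)
      by_cases hd75 : (75 : Int) ∣ (j : Int)
      · have : PySem.Int.mod (j : Int) 75 = 0 := (PySem.Int.mod_eq_zero_iff_dvd _ _).mpr hd75
        simp [h50, h75, hjl, hd50, hd75, hm50, this, pvSel, pvFix]
      · have hm75 : PySem.Int.mod (j : Int) 75 ≠ 0 := fun h =>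
          hd75 ((PySem.Int.mod_eq_zero_iff_dvd _ _).mp h)
        simp [h50, h75, hd50, hd75, hm50, hm75, pvSel, pvCode]
  · have hjl : ¬ ((j : Int) < lines) := by omega
    have hnone : ∀ (f : Int → String), ((PySem.List.pyRange 0 lines 1).map f)[j]? = none := by
      intro f
      apply List.getElem?_eq_none
      simp [PySem.List.length_pyRange_one]; omega
    rw [hout0, hnone, hnone]
    simp [h50, h75, hjl]

-- ===== VERDICT (by name: the statement is the Claim_ definition above) =====
theorem generate_test_file_spec : Claim_equal_generate_test_file := by
  intro lines _
  have hA : (fun (acc : List String) i =>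
      if PySem.Int.mod i 50 = 0 then acc ++ ["# TODO: implement feature " ++ PySem.Int.toStr i]
      else if PySem.Int.mod i 75 = 0 then acc ++ ["// FIXME: fix bug at line " ++ PySem.Int.toStr i]
      else if PySem.Int.mod i 100 = 0 then acc ++ ["/* HACK: workaround for issue " ++ PySem.Int.toStr i ++ " */"]
      else acc ++ ["code_line_" ++ PySem.Int.toStr i ++ " = " ++ PySem.Int.toStr i]) =
      (fun acc i => acc ++ [pvSelA i]) := by
    funext acc i
    unfold pvSelA pvTodo pvFix pvCode
    split_ifs <;> rfl
  show generate_test_file lines = generate_test_file_alt lines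
  show PySem.Str.join "\n" ((PySem.List.pyRange 0 lines 1).foldl (fun acc i =>
      if PySem.Int.mod i 50 = 0 then acc ++ ["# TODO: implement feature " ++ PySem.Int.toStr i]
      else if PySem.Int.mod i 75 = 0 then acc ++ ["// FIXME: fix bug at line " ++ PySem.Int.toStr i]
      else if PySem.Int.mod i 100 = 0 then acc ++ ["/* HACK: workaround for issue " ++ PySem.Int.toStr i ++ " */"]
      else acc ++ ["code_line_" ++ PySem.Int.toStr i ++ " = " ++ PySem.Int.toStr i]) []) =
    PySem.Str.join "\n" ((PySem.List.pyRange 0 lines 50).foldl (fun acc i =>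
        PySem.List.pySetD acc i ("# TODO: implement feature " ++ PySem.Int.toStr i))
      ((PySem.List.pyRange 0 lines 75).foldl (fun acc i =>
        if PySem.Int.mod i 50 ≠ 0 then
          PySem.List.pySetD acc i ("// FIXME: fix bug at line " ++ PySem.Int.toStr i)
        else acc)
        ((PySem.List.pyRange 0 lines 1).map (fun i =>
          "code_line_" ++ PySem.Int.toStr i ++ " = " ++ PySem.Int.toStr i))))
  rw [hA, PySem.List.foldl_append_singleton_eq_map, List.nil_append, pvSelA_eq_pvSel, pv_alt_list]
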